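-- pv_equiv track=rewrite | github.com/riffluv/work1 | scripts/review-coconala-reply-shadow.py | latest_reviews_by_run
-- ===== SOURCE A (Python) =====
-- def build_run_key(review: dict) -> str:
--     run_key = (review.get("run_key") or "").strip()
--     if run_key:
--         return run_key
--     return f"{review.get('shadow_generated_at', '')}|{review.get('case_id', '')}"
--
-- def latest_reviews_by_run(reviews: list[dict]) -> list[dict]:
--     latest_by_run: dict[str, dict] = {}
--     ordered_keys: list[str] = []
--     for row in reviews:
--         run_key = build_run_key(row)
--         if run_key and run_key not in latest_by_run:
--             ordered_keys.append(run_key)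
--         if run_key:
--             latest_by_run[run_key] = row
--     return [latest_by_run[key] for key in ordered_keys if key in latest_by_run]
-- ===== SOURCE B (Python) =====
-- def build_run_key(review: dict) -> str:
--     run_key = (review.get("run_key") or "").strip()
--     if run_key:
--         return run_key
--     return f"{review.get('shadow_generated_at', '')}|{review.get('case_id', '')}"
--
-- def latest_reviews_by_run(reviews: list[dict]) -> list[dict]:
--     # Stage 1: walk the list in REVERSE; setdefault is first-wins, and the
--     # first occurrence in reverse order is the last occurrence overall.
--     latest: dict[str, dict] = {}
--     for row in reversed(reviews):
--         latest.setdefault(build_run_key(row), row)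
--     # Stage 2: walk forward; at each key's first appearance emit that key's
--     # latest row (build_run_key never returns an empty string, so every row
--     # carries a key that is present in `latest`).
--     emitted: set[str] = set()
--     out: list[dict] = []
--     for row in reviews:
--         key = build_run_key(row)
--         if key not in emitted:
--             emitted.add(key)
--             out.append(latest[key])
--     return out
-- ===== Notes on version B (the rewrite author's own statement) =====
-- stated objective: alternative
-- what changed: B replaces A's single forward pass maintaining a last-wins dict plus a parallel ordered_keys list by two staged passes: a reverse pass with first-wins setdefault computes each key's last row, then a forward pass with a seen-set emits that row at each key's first appearance.
import Mathlib
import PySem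

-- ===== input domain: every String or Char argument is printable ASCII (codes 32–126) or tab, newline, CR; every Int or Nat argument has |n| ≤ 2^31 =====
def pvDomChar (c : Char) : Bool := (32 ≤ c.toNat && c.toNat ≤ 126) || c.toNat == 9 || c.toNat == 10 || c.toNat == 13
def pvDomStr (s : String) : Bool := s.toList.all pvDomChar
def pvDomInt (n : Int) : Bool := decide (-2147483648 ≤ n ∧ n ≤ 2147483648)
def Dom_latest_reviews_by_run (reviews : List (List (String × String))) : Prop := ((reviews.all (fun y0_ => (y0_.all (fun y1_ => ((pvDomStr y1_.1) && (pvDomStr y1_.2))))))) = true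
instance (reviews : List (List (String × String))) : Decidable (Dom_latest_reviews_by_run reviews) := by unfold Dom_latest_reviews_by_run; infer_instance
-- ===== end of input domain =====

-- B replaces A's single last-wins pass with ordered_keys by two staged passes (reverse first-wins setdefault, then forward emit at first appearance): an alternative decomposition, same cost.


-- ===== PORT A =====
-- build_run_key: review.get(k) is first-match lookup in the association list; `x or ""` then .strip()
-- is strip((get? k).getD "") since `or` only maps "" to "" (identity under strip); the f-string is a join.
def build_run_key (review : List (String × String)) : String :=
  let run_key := PySem.Str.strip (((PySem.Dict.mk review).get? "run_key").getD "")
  if run_key ≠ "" then run_key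
  else PySem.Str.join "" [((PySem.Dict.mk review).get? "shadow_generated_at").getD "", "|",
                          ((PySem.Dict.mk review).get? "case_id").getD ""]

def latest_reviews_by_run (reviews : List (List (String × String))) : List (List (String × String)) :=
  let st := reviews.foldl
    (fun (st : PySem.Dict String (List (String × String)) × List String) row =>
      let run_key := build_run_key row
      let ks := if run_key ≠ "" ∧ st.1.contains run_key = false then st.2 ++ [run_key] else st.2
      let d  := if run_key ≠ "" then st.1.insert run_key row else st.1
      (d, ks))
    (PySem.Dict.empty, [])
  (st.2.filter (fun k => st.1.contains k)).map (fun k => st.1.getD k [])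

-- ===== PORT B =====
-- Source B's build_run_key is textually the same helper as A's; the port shares it.
-- latest[key] cannot raise KeyError in Source B (each forward key was inserted by the reverse pass);
-- ported as getD with default [] — exact on every reachable lookup.
def latest_reviews_by_run_alt (reviews : List (List (String × String))) : List (List (String × String)) :=
  let latest := reviews.reverse.foldl
    (fun d row => d.setdefault (build_run_key row) row)
    (PySem.Dict.empty : PySem.Dict String (List (String × String)))
  (reviews.foldl
    (fun (st : PySem.Set String × List (List (String × String))) row =>
      let key := build_run_key row
      if st.1.contains key then st
      else (st.1.add key, st.2 ++ [latest.getD key []]))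
    ((PySem.Set.empty : PySem.Set String), [])).2

-- ===== PRECONDITION & SPEC =====
def Spec_latest_reviews_by_run (reviews : List (List (String × String))) (out : List (List (String × String))) : Prop := out = latest_reviews_by_run_alt reviews
instance (reviews : List (List (String × String))) (out : List (List (String × String))) : Decidable (Spec_latest_reviews_by_run reviews out) := by unfold Spec_latest_reviews_by_run; infer_instance

-- ===== CLAIM =====
def Claim_equal_latest_reviews_by_run : Prop := ∀ (reviews : List (List (String × String))), Dom_latest_reviews_by_run reviews → Spec_latest_reviews_by_run reviews (latest_reviews_by_run reviews)

-- ===== LEMMAS AND PROOFS =====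

-- build_run_key never returns the empty string: the fallback contains '|'.
theorem build_run_key_ne (row : List (String × String)) : build_run_key row ≠ "" := by
  unfold build_run_key
  set rk := PySem.Str.strip (((PySem.Dict.mk row).get? "run_key").getD "") with hrk
  by_cases h : rk ≠ ""
  · simp [h]
  · rw [if_neg h]
    intro hc
    have := congrArg String.toList hc
    simp [PySem.Str.toList_join, PySem.Chars.join, List.intercalate] at this

-- A's loop invariant: the fold over (dict, ordered_keys) is the dict fold alone,
-- with ordered_keys tracking the dict's key list (which stays Nodup).
theorem loop_inv (l : List (List (String × String)))
    (d : PySem.Dict String (List (String × String))) (ks : List String)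
    (hks : ks = d.keys) (hnd : d.keys.Nodup) :
    l.foldl
      (fun (st : PySem.Dict String (List (String × String)) × List String) row =>
        let run_key := build_run_key row
        let ks := if run_key ≠ "" ∧ st.1.contains run_key = false then st.2 ++ [run_key] else st.2
        let d  := if run_key ≠ "" then st.1.insert run_key row else st.1
        (d, ks))
      (d, ks)
    = (l.foldl (fun d row => d.insert (build_run_key row) row) d,
       (l.foldl (fun d row => d.insert (build_run_key row) row) d).keys) := by
  induction l generalizing d ks with
  | nil => simpa using hks
  | cons row t ih =>
    subst hks
    simp only [List.foldl_cons]
    have hne := build_run_key_ne row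
    by_cases hc : d.contains (build_run_key row) = false
    · simp only [hne, hc, ne_eq, not_false_eq_true, and_self, if_pos]
      exact ih _ _ (PySem.Dict.keys_insert_of_not_contains d row hc).symm
        (PySem.Dict.nodup_keys_insert d _ row hnd)
    · have hc' : d.contains (build_run_key row) = true := by simpa using hc
      simp only [hne, hc, ne_eq, not_false_eq_true, true_and, if_pos]
      exact ih _ _ (PySem.Dict.keys_insert_of_contains d row hc').symm
        (by rw [PySem.Dict.keys_insert_of_contains d row hc']; exact hnd)

-- Lookup in the forward last-wins fold = last matching row (first match in reverse), else the start dict.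
theorem get?_foldl_insert (l : List (List (String × String)))
    (d : PySem.Dict String (List (String × String))) (k : String) :
    (l.foldl (fun d row => d.insert (build_run_key row) row) d).get? k
      = (l.reverse.find? (fun r => build_run_key r == k)).or (d.get? k) := by
  induction l generalizing d with
  | nil => simp
  | cons x t ih =>
    simp only [List.foldl_cons, List.reverse_cons, List.find?_append, ih]
    have hins : ((d.insert (build_run_key x) x).get? k)
        = ([x].find? (fun r => build_run_key r == k)).or (d.get? k) := by
      by_cases h : k = build_run_key x
      · simp [PySem.Dict.get?_insert, h]
      · have : (build_run_key x == k) = false := by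
          simpa using (Ne.symm h)
        simp [PySem.Dict.get?_insert, h, List.find?, this]
    rw [hins]
    cases t.reverse.find? (fun r => build_run_key r == k) <;> simp [Option.or]
  -- note: Option.orElse from find?_append reduces to Option.or by the case split

-- Lookup in the reverse first-wins (setdefault) fold = the start dict, else the first match.
theorem get?_foldl_setdefault (m : List (List (String × String)))
    (d : PySem.Dict String (List (String × String))) (k : String) :
    (m.foldl (fun d row => d.setdefault (build_run_key row) row) d).get? k
      = (d.get? k).or (m.find? (fun r => build_run_key r == k)) := by
  induction m generalizing d with
  | nil => cases h : d.get? k <;> simp [Option.or, h]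
  | cons x t ih =>
    simp only [List.foldl_cons, ih]
    by_cases hc : d.contains (build_run_key x) = true
    · rw [PySem.Dict.setdefault_of_contains _ _ hc]
      by_cases h : build_run_key x == k
      · have hk : k = build_run_key x := (by simpa using h : build_run_key x = k).symm
        have : (d.get? k).isSome := by
          rw [hk, ← PySem.Dict.contains_eq_isSome_get?]; exact hc
        obtain ⟨v, hv⟩ := Option.isSome_iff_exists.mp this
        simp [List.find?, h, hv, Option.or]
      · simp [List.find?, h]
    · have hc' : d.contains (build_run_key x) = false := by simpa using hc
      rw [PySem.Dict.setdefault_of_not_contains _ _ hc']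
      by_cases h : k = build_run_key x
      · subst h
        have hdn : d.get? (build_run_key x) = none :=
          (PySem.Dict.get?_eq_none_iff_contains d _).mpr hc'
        simp [PySem.Dict.get?_insert, List.find?, hdn, Option.or]
      · have hb : (build_run_key x == k) = false := by simpa using (Ne.symm h)
        simp [PySem.Dict.get?_insert, h, List.find?, hb]

-- B's forward emit loop: with out = S.map g invariant, the fold returns the updated set and its image.
theorem emit_inv (g : String → List (String × String))
    (l : List (List (String × String))) (S : PySem.Set String) (out : List (List (String × String)))
    (hout : out = S.map g) :
    (l.foldl
      (fun (st : PySem.Set String × List (List (String × String))) row =>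
        let key := build_run_key row
        if st.1.contains key then st
        else (st.1.add key, st.2 ++ [g key]))
      (S, out)).2
    = (PySem.Set.update S (l.map build_run_key)).map g := by
  induction l generalizing S out with
  | nil => simpa [PySem.Set.update] using hout
  | cons x t ih =>
    subst hout
    simp only [List.foldl_cons, List.map_cons]
    have hupd : PySem.Set.update S (build_run_key x :: t.map build_run_key)
        = PySem.Set.update (S.add (build_run_key x)) (t.map build_run_key) := by
      simp [PySem.Set.update]
    rw [hupd]
    by_cases hc : S.contains (build_run_key x) = true
    · have hmem : build_run_key x ∈ S := by simpa using hc
      have hadd : S.add (build_run_key x) = S := by simp [PySem.Set.add, hmem]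
      simp only [hc, if_true, hadd]
      exact ih S (S.map g) rfl
    · have hc' : S.contains (build_run_key x) = false := by simpa using hc
      have hmem : build_run_key x ∉ S := by simpa using hc'
      have hadd : S.add (build_run_key x) = S ++ [build_run_key x] := by
        simp [PySem.Set.add, hmem]
      simp only [hc', Bool.false_eq_true, if_false]
      exact ih (S.add (build_run_key x)) (S.map g ++ [g (build_run_key x)])
        (by rw [hadd]; simp)

-- ===== VERDICT =====
theorem latest_reviews_by_run_spec : Claim_equal_latest_reviews_by_run := by
  intro reviews _
  unfold Spec_latest_reviews_by_run latest_reviews_by_run latest_reviews_by_run_alt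
  have h0 : (PySem.Dict.empty : PySem.Dict String (List (String × String))).keys = [] :=
    PySem.Dict.keys_empty
  rw [loop_inv reviews PySem.Dict.empty [] h0.symm (by rw [h0]; exact List.nodup_nil)]
  set D := reviews.foldl (fun d row => d.insert (build_run_key row) row)
    (PySem.Dict.empty : PySem.Dict String (List (String × String))) with hD
  set L := reviews.reverse.foldl (fun d row => d.setdefault (build_run_key row) row)
    (PySem.Dict.empty : PySem.Dict String (List (String × String))) with hL
  have hget : ∀ k, D.get? k = L.get? k := by
    intro k
    rw [hD, hL, get?_foldl_insert, get?_foldl_setdefault]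
    simp [PySem.Dict.get?_empty, Option.or]
    cases reviews.reverse.find? (fun r => build_run_key r == k) <;> simp [Option.or]
  have hfilter : D.keys.filter (fun k => D.contains k) = D.keys := by
    apply List.filter_eq_self.mpr
    intro k hk
    exact (PySem.Dict.contains_iff_mem_keys D k).mpr hk
  simp only [hfilter]
  -- B's output is D.keys.map (L.getD · [])
  have hB : (reviews.foldl
      (fun (st : PySem.Set String × List (List (String × String))) row =>
        let key := build_run_key row
        if st.1.contains key then st
        else (st.1.add key, st.2 ++ [L.getD key []]))
      ((PySem.Set.empty : PySem.Set String), [])).2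
      = (PySem.Set.update (PySem.Set.empty : PySem.Set String) (reviews.map build_run_key)).map
          (fun k => L.getD k []) :=
    emit_inv (fun k => L.getD k []) reviews PySem.Set.empty [] (by simp [PySem.Set.empty])
  have hkeys : D.keys = PySem.Set.update (PySem.Set.empty : PySem.Set String) (reviews.map build_run_key) := by
    rw [hD, PySem.Dict.keys_foldl_insert_key, h0]; rfl
  rw [hB]
  have hgD : (fun k => L.getD k []) = (fun k => D.getD k []) := by
    funext k
    simp [PySem.Dict.getD_eq_get?_getD, hget k]
  rw [hgD, ← hkeys]
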